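-- pv_equiv track=rewrite | github.com/FJDaz/homeos | Backend/Prod/core/ir_md_to_json.py | find_section_lines
-- ===== SOURCE A (Python) =====
-- from typing import List, Dict, Any, Optional, Tuple
--
-- def find_section_lines(md_content: str, section_title: str) -> Optional[List[str]]:
--     """
--     Find lines belonging to a specific section.
--
--     Args:
--         md_content: The Markdown content
--         section_title: The section title to find (e.g., "### 1.2 Topologie déclarée")
--
--     Returns:
--         List of lines in the section, or None if not found
--     """
--     lines = md_content.split('\n')
--     section_start = -1
--
--     # Find the section header
--     for i, line in enumerate(lines):
--         if line.strip().startswith(section_title):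
--             section_start = i
--             break
--
--     if section_start == -1:
--         return None
--
--     # Find where this section ends (next section or end of file)
--     section_lines = []
--     for i in range(section_start + 1, len(lines)):
--         current_line = lines[i].strip()
--
--         # Stop at next section (### or ##) or at horizontal rule (---)
--         if (current_line.startswith('###') or
--             current_line.startswith('##') or
--             current_line.startswith('---')):
--             break
--
--         section_lines.append(lines[i])
--
--     return section_lines
-- ===== SOURCE B (Python) =====
-- def find_section_lines(md_content, section_title):
--     """Index-table formulation: locate the header index and the table of boundary
--     indices, pick the first boundary past the header, and slice -- no collection loop."""
--     lines = md_content.split('\n')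
--     start = next((i for i, l in enumerate(lines)
--                   if l.strip().startswith(section_title)), None)
--     if start is None:
--         return None
--     stops = [i for i, l in enumerate(lines)
--              if l.strip().startswith(('###', '##', '---'))]
--     end = next((i for i in stops if i > start), len(lines))
--     return lines[start + 1:end]
-- ===== Notes on version B (the rewrite author's own statement) =====
-- stated objective: alternative
-- what changed: Replaces A's scan-then-collect loops with an index-table formulation: find the header's index, build the list of all boundary-line indices, pick the first boundary index past the header, and return a slice lines[start+1:end] instead of appending line by line.
import Mathlib
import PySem

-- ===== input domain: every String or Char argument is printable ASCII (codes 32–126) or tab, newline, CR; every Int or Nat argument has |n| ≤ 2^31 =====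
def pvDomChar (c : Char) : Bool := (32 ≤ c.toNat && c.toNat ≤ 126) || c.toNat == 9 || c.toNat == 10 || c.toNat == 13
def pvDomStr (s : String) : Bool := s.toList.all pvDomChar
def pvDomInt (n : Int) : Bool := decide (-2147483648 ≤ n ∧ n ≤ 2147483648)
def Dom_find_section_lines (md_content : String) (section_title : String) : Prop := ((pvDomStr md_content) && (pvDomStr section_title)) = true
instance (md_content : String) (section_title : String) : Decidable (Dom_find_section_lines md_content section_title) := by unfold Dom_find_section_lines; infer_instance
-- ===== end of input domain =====

-- B replaces A's scan-and-collect loop with an index-table formulation: find the header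
-- index, list all boundary indices, pick the first one past the header, slice (objective: alternative).

-- shared tests, written once: 'line.strip().startswith(...)' as both Pythons use it
def matchesTitle (title line : String) : Bool :=
  PySem.Str.startswith (PySem.Str.strip line) title

def isBoundary (line : String) : Bool :=
  PySem.Str.startswith (PySem.Str.strip line) "###"
    || PySem.Str.startswith (PySem.Str.strip line) "##"
    || PySem.Str.startswith (PySem.Str.strip line) "---"

-- ===== PORT A =====
-- first loop of A: index of the first line whose strip() starts with the title
def aFindStart (title : String) : List String → Option Nat
  | [] => none
  | l :: rest =>
      if matchesTitle title l then some 0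
      else (aFindStart title rest).map (· + 1)

-- second loop of A: collect lines until the next section header or horizontal rule
def aCollect : List String → List String
  | [] => []
  | l :: rest => if isBoundary l then [] else l :: aCollect rest

def find_section_lines (md_content : String) (section_title : String) : Option (List String) :=
  let lines := (PySem.Str.split? md_content "\n").getD []   -- sep "\n" ≠ "": split? is always some
  match aFindStart section_title lines with
  | none => none
  | some i => some (aCollect (lines.drop (i + 1)))

-- ===== PORT B =====
-- next((i for i, l in enumerate(lines) if l.strip().startswith(section_title)), None)
def bStart (title : String) (lines : List String) : Option Int :=
  (PySem.List.enumerate lines).findSome?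
    (fun p => if matchesTitle title p.2 then some p.1 else none)

-- [i for i, l in enumerate(lines) if l.strip().startswith(('###', '##', '---'))]
def bStops (lines : List String) : List Int :=
  (PySem.List.enumerate lines).filterMap
    (fun p => if isBoundary p.2 then some p.1 else none)

def find_section_lines_alt (md_content : String) (section_title : String) : Option (List String) :=
  let lines := (PySem.Str.split? md_content "\n").getD []   -- sep "\n" ≠ "": split? is always some
  match bStart section_title lines with
  | none => none
  | some start =>
      -- end = next((i for i in stops if i > start), len(lines))
      let e := ((bStops lines).find? (fun i => decide (start < i))).getD (lines.length : Int)
      some (PySem.List.slice lines (some (start + 1)) (some e))   -- lines[start+1:end]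

-- ===== PRECONDITION & SPEC =====
def Spec_find_section_lines (md_content : String) (section_title : String) (out : Option (List String)) : Prop := out = find_section_lines_alt md_content section_title
instance (md_content : String) (section_title : String) (out : Option (List String)) : Decidable (Spec_find_section_lines md_content section_title out) := by unfold Spec_find_section_lines; infer_instance

-- ===== CLAIM (what is proved, stated in full; the proofs are below) =====
def Claim_equal_find_section_lines : Prop := ∀ (md_content : String) (section_title : String), Dom_find_section_lines md_content section_title → Spec_find_section_lines md_content section_title (find_section_lines md_content section_title)

-- ===== LEMMAS AND PROOFS =====

-- A's collector is 'take up to the first boundary index'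
theorem aCollect_eq (ls : List String) :
    aCollect ls = ls.take ((ls.findIdx? isBoundary).getD ls.length) := by
  induction ls with
  | nil => rfl
  | cons l rest ih =>
    by_cases h : isBoundary l = true
    · simp [aCollect, h, List.findIdx?_cons]
    · simp only [aCollect, h, List.findIdx?_cons, ih, Bool.false_eq_true, if_false]
      cases hf : rest.findIdx? isBoundary <;> simp

-- a found index is in range
theorem aFindStart_lt (t : String) (ls : List String) (n : Nat)
    (h : aFindStart t ls = some n) : n < ls.length := by
  induction ls generalizing n with
  | nil => simp [aFindStart] at h
  | cons l rest ih =>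
    by_cases hm : matchesTitle t l = true
    · simp only [aFindStart, hm, if_true, Option.some.injEq] at h
      simp only [List.length_cons]
      omega
    · simp only [aFindStart, hm, if_false, Bool.false_eq_true] at h
      cases hf : aFindStart t rest with
      | none => simp [hf] at h
      | some m =>
        simp only [hf, Option.map_some, Option.some.injEq] at h
        have := ih m hf
        simp only [List.length_cons]
        omega

-- B's 'next' over enumerate is A's first loop, shifted by the enumeration start
theorem bStart_eq (t : String) (ls : List String) : ∀ (k : Int),
    (PySem.List.enumerate ls k).findSome?
      (fun p => if matchesTitle t p.2 then some p.1 else none)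
    = Option.map (fun n : Nat => k + (n : Int)) (aFindStart t ls) := by
  induction ls with
  | nil => intro k; simp [PySem.List.enumerate_nil, aFindStart]
  | cons l rest ih =>
    intro k
    by_cases hm : matchesTitle t l = true
    · simp [PySem.List.enumerate_cons, hm, aFindStart]
    · simp only [PySem.List.enumerate_cons, List.findSome?, hm, if_false, ih (k + 1),
        aFindStart, Bool.false_eq_true]
      cases hf : aFindStart t rest with
      | none => simp
      | some m =>
        simp only [Option.map_some, Option.some.injEq]
        push_cast
        ring

-- every index in B's boundary table lies in the enumerated range
theorem mem_stops (ls : List String) (k i : Int)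
    (h : i ∈ (PySem.List.enumerate ls k).filterMap
      (fun p => if isBoundary p.2 then some p.1 else none)) :
    k ≤ i ∧ i < k + ls.length := by
  rcases List.mem_filterMap.1 h with ⟨p, hp, hpi⟩
  rcases (PySem.List.mem_enumerate_iff _ _ _).1 hp with ⟨j, hj, rfl⟩
  by_cases hb : isBoundary (ls[j]) = true
  · simp only [hb, if_true, Option.some.injEq] at hpi
    subst hpi
    refine ⟨by omega, by push_cast; omega⟩
  · simp [hb] at hpi

-- past the header every boundary index qualifies, so 'next' picks the first boundary
theorem find_stops_tail (ls : List String) (s : Nat) : ∀ (k : Int), (s : Int) < k →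
    ((PySem.List.enumerate ls k).filterMap
        (fun p => if isBoundary p.2 then some p.1 else none)).find?
      (fun i => decide ((s : Int) < i))
    = Option.map (fun j : Nat => k + (j : Int)) (ls.findIdx? isBoundary) := by
  induction ls with
  | nil => intro k _; simp [PySem.List.enumerate_nil]
  | cons l rest ih =>
    intro k hk
    by_cases hb : isBoundary l = true
    · simp [PySem.List.enumerate_cons, hb, List.findIdx?_cons, hk]
    · simp only [PySem.List.enumerate_cons, List.filterMap_cons, hb, if_false,
        List.findIdx?_cons, ih (k + 1) (by omega), Bool.false_eq_true]
      cases hf : rest.findIdx? isBoundary with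
      | none => simp
      | some m =>
        simp only [Option.map_some, Option.some.injEq]
        push_cast
        ring

-- find? skips an appended prefix on which the predicate fails
theorem find?_append_of_none {α : Type} (p : α → Bool) (l₁ l₂ : List α)
    (h : ∀ x ∈ l₁, p x = false) : (l₁ ++ l₂).find? p = l₂.find? p := by
  induction l₁ with
  | nil => rfl
  | cons a l ih =>
    simp only [List.cons_append, List.find?, h a (by simp)]
    exact ih (fun x hx => h x (by simp [hx]))

-- the two ports agree on any list of lines
theorem main_eq (t : String) (lines : List String) :
    (match aFindStart t lines with
     | none => none
     | some i => some (aCollect (lines.drop (i + 1)))) =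
    (match bStart t lines with
     | none => none
     | some start =>
         some (PySem.List.slice lines (some (start + 1))
           (some (((bStops lines).find? (fun i => decide (start < i))).getD (lines.length : Int))))) := by
  have hb0 : bStart t lines = Option.map (fun n : Nat => (0 : Int) + (n : Int)) (aFindStart t lines) := by
    unfold bStart
    exact bStart_eq t lines 0
  rw [hb0]
  cases hs : aFindStart t lines with
  | none => simp
  | some s =>
    simp only [Option.map_some, Int.zero_add]
    have hslt : s < lines.length := aFindStart_lt t lines s hs
    have hpre : (lines.take (s + 1)).length = s + 1 := by simp; omega
    have henum : PySem.List.enumerate lines (0 : Int)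
        = PySem.List.enumerate (lines.take (s + 1)) (0 : Int)
          ++ PySem.List.enumerate (lines.drop (s + 1)) ((0 : Int) + (lines.take (s + 1)).length) := by
      conv_lhs => rw [show lines = lines.take (s + 1) ++ lines.drop (s + 1) by simp]
      exact PySem.List.enumerate_append _ _ _
    unfold bStops
    rw [show PySem.List.enumerate lines = PySem.List.enumerate lines (0 : Int) from rfl,
        henum, List.filterMap_append]
    rw [find?_append_of_none _ _ _ (by
      intro i hi
      have h2 := mem_stops (lines.take (s + 1)) 0 i hi
      rw [hpre] at h2
      simp only [decide_eq_false_iff_not, not_lt]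
      push_cast at h2 ⊢
      omega)]
    rw [show (0 : Int) + ((lines.take (s + 1)).length : Int) = ((s + 1 : Nat) : Int) by rw [hpre]; ring]
    rw [find_stops_tail (lines.drop (s + 1)) s ((s + 1 : Nat) : Int) (by exact_mod_cast Nat.lt_succ_self s)]
    have hcast : (s : Int) + 1 = ((s + 1 : Nat) : Int) := by push_cast; ring
    cases hf : (lines.drop (s + 1)).findIdx? isBoundary with
    | none =>
      simp only [Option.map_none, Option.getD_none]
      rw [hcast, PySem.List.slice_natCast]
      rw [aCollect_eq, hf]
      simp only [Option.getD_none]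
      congr 1
      rw [List.take_of_length_le (by simp), List.take_of_length_le (by simp)]
    | some j =>
      simp only [Option.map_some, Option.getD_some]
      rw [hcast, show ((s + 1 : Nat) : Int) + (j : Int) = ((s + 1 + j : Nat) : Int) by push_cast; ring,
          PySem.List.slice_natCast]
      rw [aCollect_eq, hf]
      simp only [Option.getD_some]
      rw [show s + 1 + j - (s + 1) = j by omega]

-- ===== VERDICT (by name: the statement is the Claim_ definition above) =====
theorem find_section_lines_spec : Claim_equal_find_section_lines := by
  intro md t _
  unfold Spec_find_section_lines find_section_lines find_section_lines_alt
  simpa using main_eq t ((PySem.Str.split? md "\n").getD [])
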